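-- pv_equiv track=rewrite | github.com/tibeb-dev/compitative-programming | reduce_array_size_to_half.py | minSetSize
-- ===== SOURCE A (Python) =====
-- from typing import List
--
-- from collections import Counter
--
-- def minSetSize(arr: List[int]) -> int:
--     nums = Counter(arr)
--     k = nums.most_common()
--     n = len(arr) // 2
--     size = 0
--     for j, i in enumerate(k):
--         size += i[1]
--         if size >= n:
--             return j + 1
-- ===== SOURCE B (Python) =====
-- from collections import Counter
--
-- def minSetSize(arr):
--     counts = Counter(arr)
--     buckets = [0] * (len(arr) + 1)
--     for c in counts.values():
--         buckets[c] += 1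
--     half = len(arr) // 2
--     size = 0
--     removed = 0
--     for freq in range(len(arr), 0, -1):
--         for _ in range(buckets[freq]):
--             size += freq
--             removed += 1
--             if size >= half:
--                 return removed
-- ===== Notes on version B (the rewrite author's own statement) =====
-- stated objective: alternative
-- what changed: Replaces Counter.most_common()'s comparison sort of the frequency table by a counting-sort bucket array indexed by frequency, walked from the highest frequency down.
-- outside the precondition, e.g. on minSetSize([]): A returns None, B returns None
import Mathlib
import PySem

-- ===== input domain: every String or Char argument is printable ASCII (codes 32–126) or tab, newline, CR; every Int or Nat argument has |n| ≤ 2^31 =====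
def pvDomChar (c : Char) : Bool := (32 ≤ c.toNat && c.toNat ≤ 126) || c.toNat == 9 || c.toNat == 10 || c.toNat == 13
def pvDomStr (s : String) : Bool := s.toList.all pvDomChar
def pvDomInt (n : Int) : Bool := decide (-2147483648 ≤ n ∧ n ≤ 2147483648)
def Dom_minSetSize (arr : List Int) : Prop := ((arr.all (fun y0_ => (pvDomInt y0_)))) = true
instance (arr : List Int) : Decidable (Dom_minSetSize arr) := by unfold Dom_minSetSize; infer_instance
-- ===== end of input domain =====

-- B replaces the comparison sort behind Counter.most_common() with a counting-sort
-- bucket array indexed by frequency, walked from the highest frequency down.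

-- ===== PORT A =====
-- the 'for j, i in enumerate(k)' loop with its early return (falls through only on empty input)
def pvGoA (n : Int) (j : Int) (size : Int) : List (Int × Int) → Int
  | [] => 0
  | i :: rest =>
    if size + i.2 ≥ n then j + 1 else pvGoA n (j + 1) (size + i.2) rest

def minSetSize (arr : List Int) : Int :=
  let nums := PySem.Dict.counter arr
  let k := PySem.List.sorted nums.items (fun i => i.2) true
  let n := PySem.Int.floordiv (arr.length : Int) 2
  pvGoA n 0 0 k

-- ===== PORT B =====
-- inner 'for _ in range(buckets[freq])' loop: returns (early-return value if any, size, removed)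
def pvInnerB (half freq : Int) : Nat → Int → Int → Option Int × Int × Int
  | 0, size, removed => (none, size, removed)
  | c + 1, size, removed =>
    if size + freq ≥ half then (some (removed + 1), size + freq, removed + 1)
    else pvInnerB half freq c (size + freq) (removed + 1)

-- outer 'for freq in range(len(arr), 0, -1)' loop
def pvLoopB (half : Int) (buckets : List Int) : Nat → Int → Int → Int
  | 0, _, _ => 0
  | f + 1, size, removed =>
    match pvInnerB half ((f : Int) + 1) (PySem.List.pyGetD buckets ((f : Int) + 1) 0).toNat size removed with
    | (some r, _, _) => r
    | (none, s, rm) => pvLoopB half buckets f s rm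

def minSetSize_alt (arr : List Int) : Int :=
  let counts := PySem.Dict.counter arr
  let buckets := counts.values.foldl
    (fun b c => PySem.List.pySetD b c (PySem.List.pyGetD b c 0 + 1))
    (List.replicate (arr.length + 1) (0 : Int))
  let half := PySem.Int.floordiv (arr.length : Int) 2
  pvLoopB half buckets arr.length 0 0

-- ===== PRECONDITION & SPEC =====
-- Pre_ excludes only the empty list, on which the Python A (and B) falls through and returns None, not an int.
def Pre_minSetSize (arr : List Int) : Prop := arr ≠ []
instance (arr : List Int) : Decidable (Pre_minSetSize arr) := by unfold Pre_minSetSize; infer_instance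
def pvWitness_minSetSize : List Int := [1]

def Spec_minSetSize (arr : List Int) (out : Int) : Prop := out = minSetSize_alt arr
instance (arr : List Int) (out : Int) : Decidable (Spec_minSetSize arr out) := by unfold Spec_minSetSize; infer_instance

-- ===== CLAIM (what is proved, stated in full; the proofs are below) =====
def Claim_equal_minSetSize : Prop := ∀ (arr : List Int), Dom_minSetSize arr → Pre_minSetSize arr → Spec_minSetSize arr (minSetSize arr)

-- ===== LEMMAS AND PROOFS =====

-- common abstraction: walk a list of counts, accumulating, early-returning the 1-based position
def pvWalk (n : Int) : List Int → Int → Int → Option Int × Int × Int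
  | [], size, j => (none, size, j)
  | c :: rest, size, j =>
    if size + c ≥ n then (some (j + 1), size + c, j + 1) else pvWalk n rest (size + c) (j + 1)

theorem pvGoA_eq_walk (n : Int) (k : List (Int × Int)) : ∀ j size,
    pvGoA n j size k = ((pvWalk n (k.map (·.2)) size j).1).getD 0 := by
  induction k with
  | nil => intro j size; simp [pvGoA, pvWalk]
  | cons i rest ih =>
    intro j size
    simp only [pvGoA, pvWalk, List.map_cons]
    split_ifs <;> simp [ih]

theorem pvInnerB_eq_walk (half freq : Int) (cnt : Nat) : ∀ size removed,
    pvInnerB half freq cnt size removed = pvWalk half (List.replicate cnt freq) size removed := by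
  induction cnt with
  | zero => intro s r; simp [pvInnerB, pvWalk]
  | succ c ih =>
    intro s r
    simp only [pvInnerB, List.replicate_succ, pvWalk]
    split_ifs <;> simp [ih]

theorem pvWalk_append (n : Int) (xs : List Int) : ∀ ys s j,
    pvWalk n (xs ++ ys) s j =
      match pvWalk n xs s j with
      | (some r, s', j') => (some r, s', j')
      | (none, s', j') => pvWalk n ys s' j' := by
  induction xs with
  | nil => intro ys s j; simp [pvWalk]
  | cons c rest ih =>
    intro ys s j
    simp only [List.cons_append, pvWalk]
    split_ifs <;> simp [ih]

-- the descending counting-sort expansion of the bucket array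
def pvExpand (buckets : List Int) : Nat → List Int
  | 0 => []
  | f + 1 => List.replicate (buckets.getD (f + 1) 0).toNat ((f : Int) + 1) ++ pvExpand buckets f

theorem pvLoopB_eq_walk (half : Int) (buckets : List Int) (f : Nat) : ∀ s j,
    pvLoopB half buckets f s j = ((pvWalk half (pvExpand buckets f) s j).1).getD 0 := by
  induction f with
  | zero => intro s j; simp [pvLoopB, pvExpand, pvWalk]
  | succ f ih =>
    intro s j
    have hidx : PySem.List.pyGetD buckets ((f : Int) + 1) 0 = buckets.getD (f + 1) 0 := by
      have := PySem.List.pyGetD_natCast buckets (f + 1) (0 : Int)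
      push_cast at this ⊢
      exact this
    simp only [pvLoopB, pvExpand, hidx, pvInnerB_eq_walk, pvWalk_append]
    cases h : pvWalk half (List.replicate (buckets.getD (f + 1) 0).toNat ((f : Int) + 1)) s j with
    | mk o p =>
      cases o with
      | some r => simp
      | none => cases p; simp [ih]

-- bucket fold invariant
theorem pvBuckets_getD (vs : List Int) : ∀ (b : List Int),
    (∀ c ∈ vs, 0 ≤ c ∧ c.toNat < b.length) →
    ∀ i : Nat,
      (vs.foldl (fun b c => PySem.List.pySetD b c (PySem.List.pyGetD b c 0 + 1)) b).getD i 0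
        = b.getD i 0 + (vs.count ((i : Nat) : Int) : Int) := by
  induction vs with
  | nil => intro b _ i; simp
  | cons c vs ih =>
    intro b hb i
    obtain ⟨hc0, hclt⟩ := hb c (List.mem_cons_self ..)
    have hset : PySem.List.pySetD b c (PySem.List.pyGetD b c 0 + 1)
        = b.set c.toNat (b.getD c.toNat 0 + 1) := by
      rw [PySem.List.pySetD_of_nonneg b _ hc0, PySem.List.pyGetD_of_nonneg b _ hc0]
    simp only [List.foldl_cons, hset]
    rw [ih _ (fun d hd => by simpa [List.length_set] using hb d (List.mem_cons_of_mem _ hd))]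
    have hgd : (b.set c.toNat (b.getD c.toNat 0 + 1)).getD i 0
        = if i = c.toNat then b.getD c.toNat 0 + 1 else b.getD i 0 := by
      simp only [List.getD_eq_getElem?_getD, List.getElem?_set]
      by_cases h : i = c.toNat
      · subst h
        simp [hclt]
      · simp [h, Ne.symm h]
    rw [hgd, List.count_cons]
    by_cases h : i = c.toNat
    · subst h
      have h2 : ((c.toNat : Nat) : Int) = c := by omega
      simp [h2]
      omega
    · have h2 : ¬ (c = ((i : Nat) : Int)) := by omega
      simp [h, h2]

theorem pvExpand_count (buckets : List Int) (f : Nat) (x : Int) :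
    (pvExpand buckets f).count x =
      if 1 ≤ x ∧ x ≤ (f : Int) then (buckets.getD x.toNat 0).toNat else 0 := by
  induction f with
  | zero => simp [pvExpand]; omega
  | succ f ih =>
    simp only [pvExpand, List.count_append, List.count_replicate, ih]
    by_cases hx : x = (f : Int) + 1
    · have hnat : x.toNat = f + 1 := by omega
      subst hx
      simp [hnat]
    · push_cast
      split_ifs <;> simp_all <;> omega

theorem pvExpand_mem_le (buckets : List Int) (f : Nat) (x : Int) (hx : x ∈ pvExpand buckets f) :
    x ≤ (f : Int) := by
  induction f with
  | zero => simp [pvExpand] at hx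
  | succ f ih =>
    simp only [pvExpand, List.mem_append, List.mem_replicate] at hx
    rcases hx with ⟨-, rfl⟩ | h
    · push_cast; omega
    · have := ih h; push_cast; omega

theorem pvExpand_pairwise (buckets : List Int) (f : Nat) :
    (pvExpand buckets f).Pairwise (fun a b => b ≤ a) := by
  induction f with
  | zero => simp [pvExpand]
  | succ f ih =>
    simp only [pvExpand]
    rw [List.pairwise_append]
    refine ⟨List.pairwise_replicate.2 (by simp), ih, ?_⟩
    intro a ha b hb
    rcases List.mem_replicate.1 ha with ⟨-, rfl⟩
    have := pvExpand_mem_le buckets f b hb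
    omega

theorem pvVals_bounds (arr : List Int) (c : Int) (hc : c ∈ (PySem.Dict.counter arr).values) :
    1 ≤ c ∧ c ≤ (arr.length : Int) := by
  have hv : (PySem.Dict.counter arr).values
      = ((PySem.Set.ofList arr).map (fun k => (arr.count k : Int)) : List Int) := by
    show ((PySem.Dict.counter arr).items).map (·.2) = _
    rw [PySem.Dict.items_counter]
    simp
  rw [hv] at hc
  simp only [List.mem_map] at hc
  obtain ⟨k, hk, rfl⟩ := hc
  have hk' : k ∈ arr := (PySem.Set.mem_ofList arr k).1 hk
  constructor
  · exact_mod_cast List.one_le_count_iff.2 hk'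
  · exact_mod_cast List.count_le_length

-- the crux: the bucket expansion IS the descending-sorted list of frequencies
theorem pvExpand_eq_sorted (arr : List Int) :
    pvExpand
      ((PySem.Dict.counter arr).values.foldl
        (fun b c => PySem.List.pySetD b c (PySem.List.pyGetD b c 0 + 1))
        (List.replicate (arr.length + 1) (0 : Int)))
      arr.length
    = (PySem.List.sorted (PySem.Dict.counter arr).items (fun i => i.2) true).map (·.2) := by
  set vals := (PySem.Dict.counter arr).values with hvals
  set buckets := vals.foldl
      (fun b c => PySem.List.pySetD b c (PySem.List.pyGetD b c 0 + 1))
      (List.replicate (arr.length + 1) (0 : Int)) with hbk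
  have hbounds : ∀ c ∈ vals, 1 ≤ c ∧ c ≤ (arr.length : Int) := fun c hc => pvVals_bounds arr c hc
  have hget : ∀ i : Nat, i ≤ arr.length → buckets.getD i 0 = (vals.count ((i : Nat) : Int) : Int) := by
    intro i hi
    rw [hbk, pvBuckets_getD vals _ (fun c hc => by
      have := hbounds c hc
      constructor
      · omega
      · simp only [List.length_replicate]; omega)]
    simp [List.getD_eq_getElem?_getD, Nat.lt_succ_of_le hi]
  -- count agreement → permutation with vals
  have hpermL : (pvExpand buckets arr.length).Perm vals := by
    rw [List.perm_iff_count]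
    intro x
    rw [pvExpand_count]
    by_cases hx : 1 ≤ x ∧ x ≤ (arr.length : Int)
    · have hxt : x.toNat ≤ arr.length := by omega
      rw [if_pos hx, hget x.toNat hxt]
      have : ((x.toNat : Nat) : Int) = x := by omega
      rw [this]
      simp
    · rw [if_neg hx]
      symm
      rw [List.count_eq_zero]
      intro hmem
      exact hx (hbounds x hmem)
  have hpermR : ((PySem.List.sorted (PySem.Dict.counter arr).items (fun i => i.2) true).map (·.2)).Perm vals :=
    (PySem.List.sorted_perm (PySem.Dict.counter arr).items (fun i => i.2) true).map (·.2)
  have hpwR : ((PySem.List.sorted (PySem.Dict.counter arr).items (fun i => i.2) true).map (·.2)).Pairwise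
      (fun a b : Int => b ≤ a) := by
    rw [List.pairwise_map]
    exact PySem.List.sorted_pairwise_rev (PySem.Dict.counter arr).items (fun i => i.2)
  exact List.Perm.eq_of_pairwise
    (fun a b _ _ h1 h2 => le_antisymm h2 h1)
    (pvExpand_pairwise buckets arr.length) hpwR
    (hpermL.trans hpermR.symm)

-- ===== VERDICT (by name: the statement is the Claim_ definition above) =====
theorem minSetSize_spec : Claim_equal_minSetSize := by
  intro arr _ _
  unfold Spec_minSetSize minSetSize minSetSize_alt
  simp only [pvGoA_eq_walk, pvLoopB_eq_walk, pvExpand_eq_sorted]
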